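-- pv_equiv track=rewrite | github.com/BakhtiarAhmed41/HackerRank_ProblemSolving | filled_orders.py | filledOrders
-- ===== SOURCE A (Python) =====
-- def filledOrders(order, k):
--     orders = 0
--     for i in range(0, len(order)):
--         order.sort()
--         if order[i]<= k:
--             orders += 1
--             k = k-order[i]
--         else:
--             break
--
--     return orders
-- ===== SOURCE B (Python) =====
-- def filledOrders(order, k):
--     # Selection-based: repeatedly extract the cheapest remaining order from a
--     # working pool while it fits the budget; no sorting at all.
--     # Note: A sorts `order` in place; B does not mutate it (return value is the same).
--     pool = list(order)
--     orders = 0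
--     while pool:
--         m = min(pool)
--         if m > k:
--             break
--         pool.remove(m)
--         k -= m
--         orders += 1
--     return orders
-- ===== Notes on version B (the rewrite author's own statement) =====
-- stated objective: alternative
-- what changed: B replaces A's sort-every-iteration indexed loop with a selection algorithm: it keeps a working pool and repeatedly extracts the minimum (min + remove) while it fits the budget, never sorting at all (B also leaves the input list unmutated).
import Mathlib
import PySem

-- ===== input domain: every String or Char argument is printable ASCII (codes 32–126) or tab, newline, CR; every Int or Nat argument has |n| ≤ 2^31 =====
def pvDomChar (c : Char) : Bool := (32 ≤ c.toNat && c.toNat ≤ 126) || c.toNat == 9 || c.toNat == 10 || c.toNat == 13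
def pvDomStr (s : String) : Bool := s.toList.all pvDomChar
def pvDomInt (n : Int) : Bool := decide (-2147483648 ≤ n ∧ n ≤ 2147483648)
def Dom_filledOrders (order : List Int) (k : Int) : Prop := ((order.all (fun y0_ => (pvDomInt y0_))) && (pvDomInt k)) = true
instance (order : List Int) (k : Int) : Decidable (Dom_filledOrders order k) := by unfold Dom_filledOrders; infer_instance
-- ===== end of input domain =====

-- ===== PORT A =====
-- B changes: selection by repeated min-extraction from a working pool instead of A's
-- sort-every-iteration indexed loop (objective: alternative algorithm).
-- Python A sorts `order` in place (observable mutation); B does not mutate it. Equivalence is about the return value.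
def pvLoopA (lst : List Int) (i n : Nat) (orders k : Int) : Int :=
  if _h : i < n then
    let s := PySem.List.sorted lst (fun x => x) false   -- order.sort()
    let x := s.getD i 0                                  -- order[i]  (i < len, always in range)
    if x ≤ k then pvLoopA s (i + 1) n (orders + 1) (k - x) else orders
  else orders
termination_by n - i
decreasing_by omega

def filledOrders (order : List Int) (k : Int) : Int :=
  pvLoopA order 0 order.length 0 k

-- ===== PORT B =====
theorem pvRemove?_length {xs r : List Int} {v : Int} (h : PySem.List.remove? xs v = some r) :
    r.length < xs.length := by
  have hv : v ∈ xs := by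
    by_contra hm
    rw [(PySem.List.remove?_eq_none_iff xs v).mpr hm] at h
    simp at h
  rw [PySem.List.remove?_eq_some_erase xs v hv] at h
  injection h with h
  subst h
  have h1 : (xs.erase v).length = xs.length - 1 := by simp [hv]
  have h2 : 0 < xs.length := List.length_pos_of_mem hv
  omega

-- while pool: m = min(pool); if m > k: break; pool.remove(m); k -= m; orders += 1
def pvLoopB (pool : List Int) (orders k : Int) : Int :=
  match PySem.List.min? pool (fun x => x) with
  | none => orders                                      -- pool empty: while exits
  | some m =>
    if m > k then orders                                -- break
    else
      match hr : PySem.List.remove? pool m with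
      | some rest => pvLoopB rest (orders + 1) (k - m)
      | none => orders                                  -- unreachable: min is a member
termination_by pool.length
decreasing_by exact pvRemove?_length hr

def filledOrders_alt (order : List Int) (k : Int) : Int :=
  pvLoopB order 0 k                                     -- pool = list(order)

-- ===== PRECONDITION & SPEC =====
def Spec_filledOrders (order : List Int) (k : Int) (out : Int) : Prop := out = filledOrders_alt order k
instance (order : List Int) (k : Int) (out : Int) : Decidable (Spec_filledOrders order k out) := by unfold Spec_filledOrders; infer_instance

-- ===== CLAIM (what is proved, stated in full; the proofs are below) =====
def Claim_equal_filledOrders : Prop := ∀ (order : List Int) (k : Int), Dom_filledOrders order k → Spec_filledOrders order k (filledOrders order k)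

-- ===== LEMMAS AND PROOFS =====

-- Common reference shape: the take-while loop on the sorted list (proof-only helper).
def pvLoopTW : List Int → Int → Int → Int
  | [], orders, _ => orders
  | x :: xs, orders, k => if x > k then orders else pvLoopTW xs (orders + 1) (k - x)

theorem pvLoopA_eq_pvLoopTW (fuel : Nat) :
    ∀ (lst : List Int) (i n : Nat) (orders k : Int),
      n = lst.length → n - i ≤ fuel →
      pvLoopA lst i n orders k = pvLoopTW ((PySem.List.sorted lst (fun x => x) false).drop i) orders k := by
  induction fuel with
  | zero =>
    intro lst i n orders k hn hf
    have hge : n ≤ i := by omega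
    rw [pvLoopA]
    have hdrop : (PySem.List.sorted lst (fun x => x) false).drop i = [] := by
      apply List.drop_eq_nil_of_le
      rw [PySem.List.length_sorted]; omega
    simp [hdrop, pvLoopTW, Nat.not_lt_of_le hge]
  | succ m ih =>
    intro lst i n orders k hn hf
    rw [pvLoopA]
    by_cases h : i < n
    · have hlen : i < (PySem.List.sorted lst (fun x => x) false).length := by
        rw [PySem.List.length_sorted]; omega
      set s := PySem.List.sorted lst (fun x => x) false with hs
      have hdrop : s.drop i = s[i] :: s.drop (i + 1) := List.drop_eq_getElem_cons hlen
      have hget : s.getD i 0 = s[i] := List.getD_eq_getElem s 0 hlen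
      have hss : PySem.List.sorted s (fun x => x) false = s := PySem.List.sorted_sorted lst (fun x => x)
      have hslen : n = s.length := by rw [hs, PySem.List.length_sorted]; exact hn
      rw [hdrop]
      simp only [h, dif_pos, hget, pvLoopTW]
      by_cases hk : s[i] ≤ k
      · have := ih s (i + 1) n (orders + 1) (k - s[i]) hslen (by omega)
        rw [hss] at this
        simp [hk, not_lt_of_ge hk, this]
      · simp [hk, lt_of_not_ge hk]
    · have hdrop : (PySem.List.sorted lst (fun x => x) false).drop i = [] := by
        apply List.drop_eq_nil_of_le
        rw [PySem.List.length_sorted]; omega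
      simp [hdrop, pvLoopTW, h]

theorem pvLoopB_eq_pvLoopTW (fuel : Nat) :
    ∀ (pool : List Int) (orders k : Int), pool.length ≤ fuel →
      pvLoopB pool orders k = pvLoopTW (PySem.List.sorted pool (fun x => x) false) orders k := by
  induction fuel with
  | zero =>
    intro pool orders k hf
    have : pool = [] := List.eq_nil_of_length_eq_zero (by omega)
    subst this
    rw [pvLoopB]
    simp [pvLoopTW, PySem.List.min?, PySem.List.sorted]
  | succ f ih =>
    intro pool orders k hf
    rw [pvLoopB]
    cases hsp : PySem.List.sorted pool (fun x => x) false with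
    | nil =>
      have hp : pool = [] := (PySem.List.sorted_eq_nil_iff pool (fun x => x) false).mp hsp
      subst hp
      simp [pvLoopTW, PySem.List.min?]
    | cons m0 t =>
      have hpne : pool ≠ [] := by
        intro h; subst h
        simp [PySem.List.sorted] at hsp
      have hperm' : (m0 :: t).Perm pool := by
        have := PySem.List.sorted_perm pool (fun x => x) false
        rwa [hsp] at this
      have hm0mem : m0 ∈ pool := hperm'.mem_iff.mp (List.mem_cons_self ..)
      have hhead : ∀ y ∈ pool, m0 ≤ y := PySem.List.key_head_sorted_le pool (fun x => x) hsp
      cases hmm : PySem.List.min? pool (fun x => x) with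
      | none => exact absurd ((PySem.List.min?_eq_none_iff pool (fun x => x)).mp hmm) hpne
      | some m =>
        have hmmem : m ∈ pool := PySem.List.min?_mem hmm
        have hmeq : m = m0 := le_antisymm (PySem.List.min?_isMin hmm m0 hm0mem) (hhead m hmmem)
        subst hmeq
        -- sorted (pool.erase m) = t
        have hperm : t.Perm (pool.erase m) := by
          have := hperm'.symm.erase m
          simpa using this.symm
        have hpw : t.Pairwise (· ≤ ·) := by
          have := PySem.List.sorted_pairwise pool (fun x => x)
          rw [hsp] at this
          exact (List.pairwise_cons.mp this).2
        have hst : PySem.List.sorted (pool.erase m) (fun x => x) false = t :=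
          PySem.List.sorted_id_eq_of_perm_of_pairwise (pool.erase m) t hperm hpw
        have hrem : PySem.List.remove? pool m = some (pool.erase m) :=
          PySem.List.remove?_eq_some_erase pool m hmmem
        have hlen : (pool.erase m).length ≤ f := by
          have h1 : (pool.erase m).length = pool.length - 1 := by simp [hmmem]
          have h2 : 0 < pool.length := List.length_pos_of_mem hmmem
          omega
        by_cases hk : m > k
        · simp [pvLoopTW, hk]
        · simp only [hk, ite_false]
          rw [show pvLoopTW (m :: t) orders k = pvLoopTW t (orders + 1) (k - m) by
            simp [pvLoopTW, hk]]
          split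
          next rest heq =>
            rw [hrem] at heq
            injection heq with heq
            subst heq
            rw [ih (pool.erase m) (orders + 1) (k - m) hlen, hst]
          next heq =>
            rw [hrem] at heq
            simp at heq

-- ===== VERDICT (by name: the statement is the Claim_ definition above) =====
theorem filledOrders_spec : Claim_equal_filledOrders := by
  intro order k _
  unfold Spec_filledOrders filledOrders filledOrders_alt
  rw [pvLoopB_eq_pvLoopTW order.length order 0 k (Nat.le_refl _)]
  simpa using pvLoopA_eq_pvLoopTW order.length order 0 order.length 0 k rfl (Nat.le_refl _)
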